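-- pv_equiv track=rewrite | github.com/yonsweng/ps | codeforces/1614/d.py | solve
-- ===== SOURCE A (Python) =====
-- def solve(n, a):
--     d = {1: (0, 0)}
--     a.sort()
--     for ai in a:
--         max_s = 0
--         max_c = 0
--         for k, (s, c) in d.items():
--             if ai % k == 0:
--                 if max_s < s or (max_s == s and max_c < c):
--                     max_s = s
--                     max_c = c
--         d[ai] = (max_s + ai, max_c + 1)
--
--     max_s = 0
--     max_c = 0
--     for k, (s, c) in d.items():
--         if max_s < s or (max_s == s and max_c > c):
--             max_s = s
--             max_c = c
--
--     return max_s + (n - max_c)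
-- ===== SOURCE B (Python) =====
-- def solve(n, a):
--     d = {1: (0, 0)}
--     for ai in sorted(a):
--         if ai == 0:
--             cands = [(0, 0)] + list(d.values())
--         else:
--             m = abs(ai)
--             cands = [(0, 0)]
--             i = 1
--             while i * i <= m:
--                 if m % i == 0:
--                     q = m // i
--                     for t in (i, -i, q, -q):
--                         if t in d:
--                             cands.append(d[t])
--                 i += 1
--         s, c = max(cands)
--         d[ai] = (s + ai, c + 1)
--     s, c = max([(0, 0)] + list(d.values()), key=lambda p: (p[0], -p[1]))
--     return s + (n - c)
-- ===== Notes on version B (the rewrite author's own statement) =====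
-- stated objective: faster
-- what changed: Instead of scanning every dict key per element (O(n) inner scan), B enumerates the divisors of |ai| in O(sqrt(|ai|)) and looks each candidate key up in the dict directly, and replaces the hand-rolled maximum loops with max() over the candidate list.
import Mathlib
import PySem

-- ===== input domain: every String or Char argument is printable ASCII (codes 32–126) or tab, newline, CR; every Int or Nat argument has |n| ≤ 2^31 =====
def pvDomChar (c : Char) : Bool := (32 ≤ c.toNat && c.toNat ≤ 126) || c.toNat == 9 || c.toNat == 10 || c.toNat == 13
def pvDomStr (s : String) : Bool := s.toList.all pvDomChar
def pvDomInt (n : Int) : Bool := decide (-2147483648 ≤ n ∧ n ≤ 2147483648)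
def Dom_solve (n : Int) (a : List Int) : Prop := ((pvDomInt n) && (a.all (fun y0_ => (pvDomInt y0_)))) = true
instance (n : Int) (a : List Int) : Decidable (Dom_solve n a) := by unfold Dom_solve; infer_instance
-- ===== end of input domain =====

-- B replaces A's per-element scan over ALL dict keys by an O(√|ai|) divisor
-- enumeration with direct dict lookups (asymptotically faster); return-value
-- equivalence only: A additionally sorts its list argument in place, B does not.

-- ===== PORT A =====
-- inner loop of A: best (sum, count) over all dict entries whose key divides ai
def aBest (ai : Int) (d : PySem.Dict Int (Int × Int)) : Int × Int :=
  d.items.foldl (fun (m : Int × Int) kv =>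
    if PySem.Int.mod ai kv.1 = 0 then
      if m.1 < kv.2.1 ∨ (m.1 = kv.2.1 ∧ m.2 < kv.2.2) then kv.2 else m
    else m) (0, 0)

def solve (n : Int) (a : List Int) : Int :=
  let d := (PySem.List.sorted a (fun x => x) false).foldl
    (fun d ai =>
      let b := aBest ai d
      d.insert ai (b.1 + ai, b.2 + 1))
    (PySem.Dict.ofList [((1 : Int), ((0 : Int), (0 : Int)))])
  let f := d.items.foldl (fun (m : Int × Int) kv =>
    if m.1 < kv.2.1 ∨ (m.1 = kv.2.1 ∧ kv.2.2 < m.2) then kv.2 else m) (0, 0)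
  f.1 + (n - f.2)

-- ===== PORT B =====
-- B's while loop: for i = 1, 2, … while i*i ≤ m, if i divides m, look the four
-- candidate keys ±i, ±(m/i) up in the dict and collect the values found
-- (fuel only makes the recursion structural; it never runs out: the loop stops
-- once i*i > m, and fuel starts at m + 1 ≥ the number of iterations)
def collectDivs (d : PySem.Dict Int (Int × Int)) (m : Nat) : Nat → Nat → List (Int × Int) → List (Int × Int)
  | _, 0, acc => acc
  | i, fuel + 1, acc =>
    if i * i ≤ m then
      collectDivs d m (i + 1) fuel
        (acc ++ (if m % i = 0 then
          let q := m / i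
          [(i : Int), -(i : Int), (q : Int), -(q : Int)].filterMap (fun t => d.get? t)
         else []))
    else acc

def bBest (ai : Int) (d : PySem.Dict Int (Int × Int)) : Int × Int :=
  let cands : List (Int × Int) :=
    if ai = 0 then (0, 0) :: d.values else (0, 0) :: collectDivs d ai.natAbs 1 (ai.natAbs + 1) []
  (PySem.List.max2? cands (fun p => p.1) (fun p => p.2)).getD (0, 0)

def solve_alt (n : Int) (a : List Int) : Int :=
  let d := (PySem.List.sorted a (fun x => x) false).foldl
    (fun d ai =>
      let b := bBest ai d
      d.insert ai (b.1 + ai, b.2 + 1))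
    (PySem.Dict.ofList [((1 : Int), ((0 : Int), (0 : Int)))])
  let f := (PySem.List.max2? ((0, 0) :: d.values) (fun p => p.1) (fun p => -p.2)).getD (0, 0)
  f.1 + (n - f.2)

-- ===== PRECONDITION & SPEC =====
-- Pre_ excludes exactly the inputs on which A raises ZeroDivisionError:
-- 0 ∈ a together with a second 0 or some positive element (then some later
-- element is taken modulo the dict key 0).
def Pre_solve (n : Int) (a : List Int) : Prop :=
  ¬ ((0 : Int) ∈ a ∧ (1 < a.count 0 ∨ ∃ x ∈ a, 0 < x))
instance (n : Int) (a : List Int) : Decidable (Pre_solve n a) := by unfold Pre_solve; infer_instance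

def pvWitness_solve : Int × List Int := (3, [2, 4])

def Spec_solve (n : Int) (a : List Int) (out : Int) : Prop := out = solve_alt n a
instance (n : Int) (a : List Int) (out : Int) : Decidable (Spec_solve n a out) := by unfold Spec_solve; infer_instance

-- ===== CLAIM (what is proved, stated in full; the proofs are below) =====
def Claim_equal_solve : Prop := ∀ (n : Int) (a : List Int), Dom_solve n a → Pre_solve n a → Spec_solve n a (solve n a)

-- ===== LEMMAS AND PROOFS =====

-- running-maximum machinery: foldl of "replace the accumulator when lt" computes
-- the unique maximum of x0 :: l for a linear strict order lt
def pmax (lt : Int × Int → Int × Int → Bool) (x0 : Int × Int) (l : List (Int × Int)) : Int × Int :=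
  l.foldl (fun m x => if lt m x then x else m) x0

theorem pmax_mem (lt) (x0 : Int × Int) (l : List (Int × Int)) :
    pmax lt x0 l = x0 ∨ pmax lt x0 l ∈ l := by
  induction l generalizing x0 with
  | nil => exact Or.inl rfl
  | cons x t ih =>
    simp only [pmax, List.foldl_cons] at *
    rcases ih (if lt x0 x then x else x0) with h | h
    · rw [h]
      by_cases hx : lt x0 x = true
      · rw [if_pos hx]; right; left
      · rw [if_neg hx]; left; rfl
    · right; right; exact h

theorem pmax_not_lt (lt : Int × Int → Int × Int → Bool)
    (hirr : ∀ a, lt a a = false)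
    (htrans : ∀ a b c, lt a b = true → lt b c = true → lt a c = true)
    (hneg : ∀ a b c, lt a b = false → lt b c = false → lt a c = false)
    (x0 : Int × Int) (l : List (Int × Int)) :
    ∀ y, (y = x0 ∨ y ∈ l) → lt (pmax lt x0 l) y = false := by
  induction l generalizing x0 with
  | nil =>
    rintro y (rfl | h)
    · exact hirr y
    · simp at h
  | cons x t ih =>
    intro y hy
    simp only [pmax, List.foldl_cons] at *
    have hy' : y = x0 ∨ (y = x ∨ y ∈ t) := by
      rcases hy with rfl | hm
      · exact Or.inl rfl
      · exact Or.inr (List.mem_cons.mp hm)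
    by_cases hx : lt x0 x = true
    · rw [if_pos hx]
      rcases hy' with rfl | rfl | h
      · by_contra hc
        rw [Bool.not_eq_false] at hc
        have := htrans _ _ _ hc hx
        have h2 := ih x x (Or.inl rfl)
        rw [this] at h2; cases h2
      · exact ih y y (Or.inl rfl)
      · exact ih x y (Or.inr h)
    · rw [if_neg hx]
      rw [Bool.not_eq_true] at hx
      rcases hy' with rfl | rfl | h
      · exact ih y y (Or.inl rfl)
      · exact hneg _ _ _ (ih x0 x0 (Or.inl rfl)) hx
      · exact ih x0 y (Or.inr h)

theorem pmax_congr (lt : Int × Int → Int × Int → Bool)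
    (hirr : ∀ a, lt a a = false)
    (htrans : ∀ a b c, lt a b = true → lt b c = true → lt a c = true)
    (hneg : ∀ a b c, lt a b = false → lt b c = false → lt a c = false)
    (hconn : ∀ a b, lt a b = false → lt b a = false → a = b)
    (x0 : Int × Int) (l1 l2 : List (Int × Int))
    (h : ∀ v, (v = x0 ∨ v ∈ l1) ↔ (v = x0 ∨ v ∈ l2)) :
    pmax lt x0 l1 = pmax lt x0 l2 := by
  apply hconn
  · exact pmax_not_lt lt hirr htrans hneg x0 l1 _ ((h _).mpr (pmax_mem lt x0 l2))
  · exact pmax_not_lt lt hirr htrans hneg x0 l2 _ ((h _).mp (pmax_mem lt x0 l1))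

-- the two concrete orders used by the programs
def ltA (m x : Int × Int) : Bool := decide (m.1 < x.1 ∨ (m.1 = x.1 ∧ m.2 < x.2))
def ltF (m x : Int × Int) : Bool := decide (m.1 < x.1 ∨ (m.1 = x.1 ∧ x.2 < m.2))

theorem ltA_irr : ∀ a : Int × Int, ltA a a = false := by
  intro a; simp only [ltA, decide_eq_false_iff_not]; omega
theorem ltA_trans : ∀ a b c : Int × Int, ltA a b = true → ltA b c = true → ltA a c = true := by
  intro a b c; simp only [ltA, decide_eq_true_eq]; omega
theorem ltA_neg : ∀ a b c : Int × Int, ltA a b = false → ltA b c = false → ltA a c = false := by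
  intro a b c; simp only [ltA, decide_eq_false_iff_not]; omega
theorem ltA_conn : ∀ a b : Int × Int, ltA a b = false → ltA b a = false → a = b := by
  intro a b; simp only [ltA, decide_eq_false_iff_not]
  intro h1 h2
  have : a.1 = b.1 ∧ a.2 = b.2 := by omega
  exact Prod.ext this.1 this.2
-- A's inner loop is pmax ltA over the values of the entries whose key divides ai
theorem aBest_eq_pmax (ai : Int) (d : PySem.Dict Int (Int × Int)) :
    aBest ai d =
      pmax ltA (0, 0) ((d.items.filter (fun kv => PySem.Int.mod ai kv.1 == 0)).map (fun kv => kv.2)) := by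
  simp only [aBest, pmax, List.foldl_map, List.foldl_filter, ltA, decide_eq_true_eq, beq_iff_eq]

-- A's final loop is pmax ltF over the dict values
theorem aFinal_eq_pmax (d : PySem.Dict Int (Int × Int)) :
    d.items.foldl (fun (m : Int × Int) kv =>
      if m.1 < kv.2.1 ∨ (m.1 = kv.2.1 ∧ kv.2.2 < m.2) then kv.2 else m) (0, 0)
    = pmax ltF (0, 0) d.values := by
  simp only [pmax, PySem.Dict.values, List.foldl_map, ltF, decide_eq_true_eq]

-- B's max2? over a cons is the same running maximum
theorem max2?_cons_getD (k2 : Int × Int → Int) (lt : Int × Int → Int × Int → Bool)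
    (hlt : ∀ m x : Int × Int,
      (decide (m.1 < x.1) || (!decide (x.1 < m.1) && decide (k2 m < k2 x))) = lt m x)
    (x0 : Int × Int) (l : List (Int × Int)) :
    (PySem.List.max2? (x0 :: l) (fun p => p.1) k2).getD (0, 0) = pmax lt x0 l := by
  simp only [PySem.List.max2?, List.foldl_cons, hlt]
  induction l generalizing x0 with
  | nil => rfl
  | cons x t ih =>
    simp only [List.foldl_cons, pmax] at *
    by_cases h : lt x0 x = true
    · simp only [h, if_true]
      exact ih x
    · simp only [h, if_false, Bool.false_eq_true]
      exact ih x0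

theorem max2A_eq_pmax (x0 : Int × Int) (l : List (Int × Int)) :
    (PySem.List.max2? (x0 :: l) (fun p => p.1) (fun p => p.2)).getD (0, 0) = pmax ltA x0 l := by
  apply max2?_cons_getD
  intro m x
  rw [Bool.eq_iff_iff]
  simp only [ltA, Bool.or_eq_true, Bool.and_eq_true, Bool.not_eq_true',
    decide_eq_true_eq, decide_eq_false_iff_not]
  omega

theorem max2F_eq_pmax (x0 : Int × Int) (l : List (Int × Int)) :
    (PySem.List.max2? (x0 :: l) (fun p => p.1) (fun p => -p.2)).getD (0, 0) = pmax ltF x0 l := by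
  apply max2?_cons_getD
  intro m x
  rw [Bool.eq_iff_iff]
  simp only [ltF, Bool.or_eq_true, Bool.and_eq_true, Bool.not_eq_true',
    decide_eq_true_eq, decide_eq_false_iff_not]
  omega

-- what B's while loop collects
theorem mem_collectDivs (d : PySem.Dict Int (Int × Int)) (m : Nat) (i : Nat) (fuel : Nat)
    (acc : List (Int × Int)) (hf : m < i * i + fuel) (v : Int × Int) :
    v ∈ collectDivs d m i fuel acc ↔ v ∈ acc ∨ ∃ j : Nat, i ≤ j ∧ j * j ≤ m ∧ m % j = 0 ∧
      (d.get? (j : Int) = some v ∨ d.get? (-(j : Int)) = some v ∨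
       d.get? ((m / j : Nat) : Int) = some v ∨ d.get? (-((m / j : Nat) : Int)) = some v) := by
  induction fuel generalizing i acc with
  | zero =>
    simp only [collectDivs]
    constructor
    · exact Or.inl
    · rintro (h | ⟨j, hij, hjm, -⟩)
      · exact h
      · have := Nat.mul_le_mul hij hij
        omega
  | succ fuel ih =>
    rw [collectDivs]
    by_cases hi : i * i ≤ m
    · rw [if_pos hi]
      have hf2 : m < (i + 1) * (i + 1) + fuel := by
        have h : (i + 1) * (i + 1) = i * i + i + i + 1 := by ring
        omega
      rw [ih (i + 1) _ hf2]
      rw [List.mem_append]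
      constructor
      · rintro ((ha | hl) | hr)
        · exact Or.inl ha
        · by_cases hmi : m % i = 0
          · rw [if_pos hmi, List.mem_filterMap] at hl
            obtain ⟨t, ht, hget⟩ := hl
            refine Or.inr ⟨i, le_refl i, hi, hmi, ?_⟩
            simp only [List.mem_cons, List.not_mem_nil, or_false] at ht
            rcases ht with rfl | rfl | rfl | rfl
            · exact Or.inl hget
            · exact Or.inr (Or.inl hget)
            · exact Or.inr (Or.inr (Or.inl hget))
            · exact Or.inr (Or.inr (Or.inr hget))
          · rw [if_neg hmi] at hl
            simp at hl
        · obtain ⟨j, hij, rest⟩ := hr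
          exact Or.inr ⟨j, le_trans (Nat.le_succ i) hij, rest⟩
      · rintro (ha | ⟨j, hij, hjm, hmod, hgets⟩)
        · exact Or.inl (Or.inl ha)
        · rcases Nat.eq_or_lt_of_le hij with rfl | hlt
          · refine Or.inl (Or.inr ?_)
            rw [if_pos hmod, List.mem_filterMap]
            rcases hgets with h | h | h | h
            · exact ⟨(i : Int), by simp, h⟩
            · exact ⟨-(i : Int), by simp, h⟩
            · exact ⟨((m / i : Nat) : Int), by simp, h⟩
            · exact ⟨-((m / i : Nat) : Int), by simp, h⟩
          · exact Or.inr ⟨j, hlt, hjm, hmod, hgets⟩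
    · rw [if_neg hi]
      constructor
      · exact Or.inl
      · rintro (h | ⟨j, hij, hjm, -⟩)
        · exact h
        · have := Nat.mul_le_mul hij hij
          omega

-- candidate sets agree: dict entries with a key dividing ai = divisor-probed entries
theorem candset (d : PySem.Dict Int (Int × Int)) (hnd : d.keys.Nodup)
    (h0 : (0 : Int) ∉ d.keys) (ai : Int) (hai : ai ≠ 0) (v : Int × Int) :
    v ∈ (d.items.filter (fun kv => PySem.Int.mod ai kv.1 == 0)).map (fun kv => kv.2) ↔
      v ∈ collectDivs d ai.natAbs 1 (ai.natAbs + 1) [] := by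
  have hm1 : 1 ≤ ai.natAbs := Int.natAbs_pos.mpr hai
  rw [mem_collectDivs d ai.natAbs 1 (ai.natAbs + 1) [] (by omega) v]
  simp only [List.not_mem_nil, false_or]
  constructor
  · intro hv
    rw [List.mem_map] at hv
    obtain ⟨kv, hkv, rfl⟩ := hv
    rw [List.mem_filter] at hkv
    obtain ⟨hmem, hdvd⟩ := hkv
    have hdvd' : kv.1 ∣ ai := (PySem.Int.mod_eq_zero_iff_dvd ai kv.1).mp (by simpa using hdvd)
    have hk0 : kv.1 ≠ 0 := by
      intro h
      exact h0 (h ▸ PySem.Dict.mem_keys_of_mem_items d hmem)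
    have hget : d.get? kv.1 = some kv.2 := by
      have : (kv.1, kv.2) ∈ d.items := by simpa using hmem
      exact PySem.Dict.get?_of_mem_items d this hnd
    have hu1 : 1 ≤ kv.1.natAbs := Int.natAbs_pos.mpr hk0
    have hudvd : kv.1.natAbs ∣ ai.natAbs := Int.natAbs_dvd_natAbs.mpr hdvd'
    have hum : kv.1.natAbs ≤ ai.natAbs := Nat.le_of_dvd (by omega) hudvd
    have hcases : kv.1 = (kv.1.natAbs : Int) ∨ kv.1 = -(kv.1.natAbs : Int) := Int.natAbs_eq kv.1
    by_cases hsq : kv.1.natAbs * kv.1.natAbs ≤ ai.natAbs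
    · refine ⟨kv.1.natAbs, hu1, hsq, Nat.mod_eq_zero_of_dvd hudvd, ?_⟩
      rcases hcases with h | h
      · exact Or.inl (h ▸ hget)
      · exact Or.inr (Or.inl (h ▸ hget))
    · set q := ai.natAbs / kv.1.natAbs with hqdef
      have hq : q * kv.1.natAbs = ai.natAbs := Nat.div_mul_cancel hudvd
      have hq0 : q ≠ 0 := by
        intro h
        rw [h] at hq
        simp at hq
        omega
      have hqq : q * q ≤ ai.natAbs := by nlinarith
      have hmq : ai.natAbs / q = kv.1.natAbs := by
        rw [← hq, Nat.mul_div_cancel_left _ (Nat.pos_of_ne_zero hq0)]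
      refine ⟨q, Nat.one_le_iff_ne_zero.mpr hq0, hqq, ?_, ?_⟩
      · exact Nat.mod_eq_zero_of_dvd ⟨kv.1.natAbs, hq.symm⟩
      · rw [hmq]
        rcases hcases with h | h
        · exact Or.inr (Or.inr (Or.inl (h ▸ hget)))
        · exact Or.inr (Or.inr (Or.inr (h ▸ hget)))
  · rintro ⟨j, hj1, hjj, hmod, hgets⟩
    have hjd : j ∣ ai.natAbs := Nat.dvd_of_mod_eq_zero hmod
    have hqd : (ai.natAbs / j) ∣ ai.natAbs := Nat.div_dvd_of_dvd hjd
    have habs : ((ai.natAbs : Int)) ∣ ai := Int.natAbs_dvd.mpr dvd_rfl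
    have hjdi : ((j : Nat) : Int) ∣ ai := dvd_trans (Int.natCast_dvd_natCast.mpr hjd) habs
    have hqdi : (((ai.natAbs / j : Nat)) : Int) ∣ ai := dvd_trans (Int.natCast_dvd_natCast.mpr hqd) habs
    rw [List.mem_map]
    rcases hgets with h | h | h | h
    · exact ⟨(((j : Nat) : Int), v), List.mem_filter.mpr ⟨PySem.Dict.mem_items_of_get?_eq_some d h,
        by simpa using (PySem.Int.mod_eq_zero_iff_dvd ai _).mpr hjdi⟩, rfl⟩
    · exact ⟨((-((j : Nat) : Int)), v), List.mem_filter.mpr ⟨PySem.Dict.mem_items_of_get?_eq_some d h,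
        by simpa using (PySem.Int.mod_eq_zero_iff_dvd ai _).mpr ((neg_dvd).mpr hjdi)⟩, rfl⟩
    · exact ⟨((((ai.natAbs / j : Nat)) : Int), v), List.mem_filter.mpr ⟨PySem.Dict.mem_items_of_get?_eq_some d h,
        by simpa using (PySem.Int.mod_eq_zero_iff_dvd ai _).mpr hqdi⟩, rfl⟩
    · exact ⟨((-(((ai.natAbs / j : Nat)) : Int)), v), List.mem_filter.mpr ⟨PySem.Dict.mem_items_of_get?_eq_some d h,
        by simpa using (PySem.Int.mod_eq_zero_iff_dvd ai _).mpr ((neg_dvd).mpr hqdi)⟩, rfl⟩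

theorem step_eq (ai : Int) (d : PySem.Dict Int (Int × Int)) (hnd : d.keys.Nodup)
    (h0 : (0 : Int) ∉ d.keys) : aBest ai d = bBest ai d := by
  rw [aBest_eq_pmax]
  unfold bBest
  by_cases hai : ai = 0
  · rw [if_pos hai, max2A_eq_pmax]
    subst hai
    have hfilter : d.items.filter (fun kv => PySem.Int.mod 0 kv.1 == 0) = d.items := by
      apply List.filter_eq_self.mpr
      intro kv _
      simp [PySem.Int.mod_eq_zero_iff_dvd]
    rw [hfilter]
    rfl
  · rw [if_neg hai, max2A_eq_pmax]
    apply pmax_congr ltA ltA_irr ltA_trans ltA_neg ltA_conn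
    intro v
    constructor
    · rintro (rfl | hv)
      · exact Or.inl rfl
      · exact Or.inr ((candset d hnd h0 ai hai v).mp hv)
    · rintro (rfl | hv)
      · exact Or.inl rfl
      · exact Or.inr ((candset d hnd h0 ai hai v).mpr hv)

theorem loop_eq (l : List Int) (d : PySem.Dict Int (Int × Int)) (hnd : d.keys.Nodup)
    (hz : (0 : Int) ∈ d.keys → l = [])
    (hQ : ∀ (i : Nat) (h : i < l.length), l[i] = 0 → i = l.length - 1) :
    l.foldl (fun d ai => let b := aBest ai d; d.insert ai (b.1 + ai, b.2 + 1)) d =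
    l.foldl (fun d ai => let b := bBest ai d; d.insert ai (b.1 + ai, b.2 + 1)) d := by
  induction l generalizing d with
  | nil => rfl
  | cons ai t ih =>
    simp only [List.foldl_cons]
    have h0' : (0 : Int) ∉ d.keys := fun h => absurd (hz h) (List.cons_ne_nil ai t)
    rw [← step_eq ai d hnd h0']
    apply ih
    · exact PySem.Dict.nodup_keys_insert _ _ _ hnd
    · intro h
      rcases (PySem.Dict.mem_keys_insert _ _ _ _).mp h with h1 | h1
      · have := hQ 0 (by simp) (by simpa using h1.symm)
        simp at this
        exact List.eq_nil_of_length_eq_zero this.symm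
      · exact absurd (hz h1) (List.cons_ne_nil ai t)
    · intro i hi hti
      have := hQ (i + 1) (by simpa using Nat.succ_lt_succ hi) (by simpa using hti)
      simp at this
      omega

-- sorted a puts any 0 last when Pre_ holds
theorem hQ_sorted (n : Int) (a : List Int) (hpre : Pre_solve n a) :
    ∀ (i : Nat) (h : i < (PySem.List.sorted a (fun x => x) false).length),
      (PySem.List.sorted a (fun x => x) false)[i] = 0 →
      i = (PySem.List.sorted a (fun x => x) false).length - 1 := by
  intro i hi h0i
  by_contra hne
  set sa := PySem.List.sorted a (fun x => x) false with hsa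
  have hperm : sa.Perm a := PySem.List.sorted_perm a (fun x => x) false
  have hlen : i + 1 < sa.length := by omega
  have hpair : sa.Pairwise (fun x y => x ≤ y) := PySem.List.sorted_pairwise a (fun x => x)
  have hle : sa[i] ≤ sa[i + 1] := List.pairwise_iff_getElem.mp hpair i (i + 1) hi hlen (by omega)
  have hmem : sa[i + 1] ∈ a := hperm.mem_iff.mp (List.getElem_mem hlen)
  have h0a : (0 : Int) ∈ a := hperm.mem_iff.mp (h0i ▸ List.getElem_mem hi)
  by_cases hz2 : sa[i + 1] = 0
  · have hdrop : sa.drop i = 0 :: 0 :: sa.drop (i + 2) := by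
      rw [List.drop_eq_getElem_cons hi, List.drop_eq_getElem_cons hlen, h0i, hz2]
    have hc2 : (0 :: 0 :: sa.drop (i + 2)).count (0 : Int) = (sa.drop (i + 2)).count 0 + 2 := by
      simp
    have hcnt : 2 ≤ sa.count 0 := by
      have hdec : sa.count 0 = (sa.take i).count 0 + (sa.drop i).count 0 := by
        conv_lhs => rw [← List.take_append_drop i sa]
        rw [List.count_append]
      rw [hdrop, hc2] at hdec
      omega
    have hcnt' : 1 < a.count 0 := by rwa [hperm.count_eq] at hcnt
    exact hpre ⟨h0a, Or.inl hcnt'⟩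
  · have hpos : 0 < sa[i + 1] := by rw [h0i] at hle; omega
    exact hpre ⟨h0a, Or.inr ⟨sa[i + 1], hmem, hpos⟩⟩

-- ===== VERDICT (by name: the statement is the Claim_ definition above) =====
theorem solve_spec : Claim_equal_solve := by
  intro n a hdom hpre
  show solve n a = solve_alt n a
  unfold solve solve_alt
  rw [loop_eq (PySem.List.sorted a (fun x => x) false)
        (PySem.Dict.ofList [((1 : Int), ((0 : Int), (0 : Int)))])
        (by decide) (fun h => absurd h (by decide)) (hQ_sorted n a hpre)]
  simp only [aFinal_eq_pmax, max2F_eq_pmax]
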